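-- pv_equiv track=rewrite | github.com/YarelOr-dn/drivenets-topology-studio | scaler/scaler/wizard/scale_operations.py | _find_free_numbers
-- ===== SOURCE A (Python) =====
-- from typing import Dict, List, Set, Tuple, Optional, Any
--
-- def _find_free_numbers(used: Set[int], count: int, start_from: int = 1) -> List[int]:
--     """Find `count` free numbers starting from `start_from`, skipping any in `used`."""
--     result = []
--     n = start_from
--     while len(result) < count:
--         if n not in used:
--             result.append(n)
--         n += 1
--     return result
-- ===== SOURCE B (Python) =====
-- def _find_free_numbers(used, count, start_from=1):
--     """Find `count` free numbers starting from `start_from`, skipping any in `used`."""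
--     blockers = sorted({u for u in used if u >= start_from})
--     out = []
--     remaining = count
--     n = start_from
--     for b in blockers:
--         if remaining <= 0:
--             break
--         if n < b:
--             take = min(b - n, remaining)
--             out += range(n, n + take)
--             remaining -= take
--         n = b + 1
--     if remaining > 0:
--         out += range(n, n + remaining)
--     return out
-- ===== Notes on version B (the rewrite author's own statement) =====
-- stated objective: alternative
-- what changed: Replaces A's per-candidate membership loop by sorting the deduplicated used values >= start_from once and emitting the free numbers as whole ranges between consecutive blockers.
import Mathlib
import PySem

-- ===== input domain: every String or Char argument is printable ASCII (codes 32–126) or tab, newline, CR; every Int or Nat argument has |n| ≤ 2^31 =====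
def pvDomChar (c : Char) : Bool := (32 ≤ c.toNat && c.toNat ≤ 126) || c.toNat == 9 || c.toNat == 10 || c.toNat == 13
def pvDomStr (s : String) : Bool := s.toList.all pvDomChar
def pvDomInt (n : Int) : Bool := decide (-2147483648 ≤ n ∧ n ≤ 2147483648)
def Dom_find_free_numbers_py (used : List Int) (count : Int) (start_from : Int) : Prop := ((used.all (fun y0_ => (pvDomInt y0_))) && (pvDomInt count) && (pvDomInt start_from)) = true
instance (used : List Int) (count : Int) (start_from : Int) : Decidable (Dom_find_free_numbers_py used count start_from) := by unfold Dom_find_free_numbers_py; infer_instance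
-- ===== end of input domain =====

-- B sorts the deduplicated used values >= start_from once and emits the free numbers as whole
-- ranges between consecutive blockers, instead of A's per-candidate membership loop
-- (objective: alternative algorithm, same exact result).

-- termination helpers for A's while-loop port
theorem pv_filter_succ (used : List Int) (n : Int) :
    used.filter (fun u => decide (n + 1 ≤ u)) = used.filter (fun u => decide (n < u)) := by
  apply List.filter_congr
  intro x _
  simp only [decide_eq_decide]
  omega

theorem pv_filter_mono (used : List Int) (n : Int) :
    (used.filter (fun u => decide (n < u))).length ≤ (used.filter (fun u => decide (n ≤ u))).length := by
  apply List.Sublist.length_le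
  apply List.monotone_filter_right
  intro x hx
  simp only [decide_eq_true_eq] at hx ⊢; omega

theorem pv_filter_lt_of_mem (used : List Int) (n : Int) (h : n ∈ used) :
    (used.filter (fun u => decide (n < u))).length < (used.filter (fun u => decide (n ≤ u))).length := by
  induction used with
  | nil => cases h
  | cons a t ih =>
    have mono := pv_filter_mono t n
    rcases List.mem_cons.mp h with h' | ht
    · subst h'
      simp
      omega
    · have := ih ht
      by_cases h1 : (n : Int) < a
      · have h2 : (n ≤ a) := by omega
        simp [h1, h2]; omega
      · by_cases h2 : (n : Int) ≤ a
        · simp [h1, h2]; omega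
        · simp [h1, h2]; omega

-- ===== PORT A =====
-- while len(result) < count: if n not in used: result.append(n); n += 1
def pvScanA (used : List Int) (count : Int) (result : List Int) (n : Int) : List Int :=
  if h : (result.length : Int) < count then
    if hc : used.contains n then
      pvScanA used count result (n + 1)
    else
      pvScanA used count (result ++ [n]) (n + 1)
  else result
termination_by (count - result.length).toNat + (used.filter (fun u => decide (n ≤ u))).length
decreasing_by
  · rw [pv_filter_succ]
    have := pv_filter_lt_of_mem used n (by simpa using hc)
    omega
  · rw [pv_filter_succ]
    have := pv_filter_mono used n
    simp only [List.length_append, List.length_singleton]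
    omega

def find_free_numbers_py (used : List Int) (count : Int) (start_from : Int) : List Int :=
  pvScanA used count [] start_from

-- ===== PORT B =====
-- for b in blockers (sorted, deduplicated): emit range(n, n + take), jump to b + 1; tail range last
def pvGapFill : List Int → Int → Int → List Int
  | [], remaining, n =>
      if 0 < remaining then PySem.List.pyRange n (n + remaining) 1 else []
  | b :: bs, remaining, n =>
      if remaining ≤ 0 then []
      else if n < b then
        PySem.List.pyRange n (n + min (b - n) remaining) 1
          ++ pvGapFill bs (remaining - min (b - n) remaining) (b + 1)
      else pvGapFill bs remaining (b + 1)

def find_free_numbers_py_alt (used : List Int) (count : Int) (start_from : Int) : List Int :=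
  pvGapFill
    (PySem.List.sorted (PySem.Set.ofList (used.filter (fun u => decide (start_from ≤ u)))) (fun x => x) false)
    count start_from

-- ===== PRECONDITION & SPEC =====
def Spec_find_free_numbers_py (used : List Int) (count : Int) (start_from : Int) (out : List Int) : Prop := out = find_free_numbers_py_alt used count start_from
instance (used : List Int) (count : Int) (start_from : Int) (out : List Int) : Decidable (Spec_find_free_numbers_py used count start_from out) := by unfold Spec_find_free_numbers_py; infer_instance

-- ===== CLAIM (what is proved, stated in full; the proofs are below) =====
def Claim_equal_find_free_numbers_py : Prop := ∀ (used : List Int) (count : Int) (start_from : Int), Dom_find_free_numbers_py used count start_from → Spec_find_free_numbers_py used count start_from (find_free_numbers_py used count start_from)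

-- ===== LEMMAS AND PROOFS =====

-- reference function: the first `k` integers ≥ n that are not in `used`
def pvFree (used : List Int) (k : Int) (n : Int) : List Int :=
  if h : 0 < k then
    if hc : used.contains n then pvFree used k (n + 1)
    else n :: pvFree used (k - 1) (n + 1)
  else []
termination_by k.toNat + (used.filter (fun u => decide (n ≤ u))).length
decreasing_by
  · rw [pv_filter_succ]
    have := pv_filter_lt_of_mem used n (by simpa using hc)
    omega
  · rw [pv_filter_succ]
    have := pv_filter_mono used n
    omega

theorem pv_goA_eq (used : List Int) (count : Int) (result : List Int) (n : Int) :
    pvScanA used count result n = result ++ pvFree used (count - result.length) n := by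
  fun_induction pvScanA used count result n with
  | case1 result n h hc ih =>
    have h0 : 0 < count - (result.length : Int) := by omega
    conv_rhs => rw [pvFree, dif_pos h0, dif_pos hc]
    exact ih
  | case2 result n h hc ih =>
    have h0 : 0 < count - (result.length : Int) := by omega
    conv_rhs => rw [pvFree, dif_pos h0, dif_neg hc]
    rw [ih]
    simp only [List.length_append, List.length_singleton, List.append_assoc, List.cons_append,
      List.nil_append]
    have e : count - ((result.length : Int) + 1) = count - (result.length : Int) - 1 := by omega
    push_cast
    rw [e]
  | case3 result n h =>
    rw [pvFree, dif_neg (by omega)]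
    simp

theorem pv_free_nonpos (used : List Int) (k n : Int) (h : k ≤ 0) : pvFree used k n = [] := by
  rw [pvFree, dif_neg (by omega)]

-- a fully free stretch [n, b) of the number line is emitted as one range by pvFree
theorem pv_free_gap (used : List Int) (b : Int) (g : Nat) :
    ∀ k n : Int, g = (min (b - n) k).toNat → 0 ≤ k → n ≤ b →
    (∀ m : Int, n ≤ m → m < b → used.contains m = false) →
    pvFree used k n =
      PySem.List.pyRange n (min b (n + k)) 1 ++ pvFree used (k - (min b (n + k) - n)) (min b (n + k)) := by
  induction g with
  | zero =>
    intro k n hg hk hnb hfree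
    have ht : min b (n + k) = n := by omega
    rw [ht, PySem.List.pyRange_one_eq_nil (le_refl n)]
    simp
  | succ g ih =>
    intro k n hg hk hnb hfree
    have hnb' : n < b := by omega
    have hk' : 0 < k := by omega
    have hcn : used.contains n = false := hfree n (le_refl n) hnb'
    have ht : n < min b (n + k) := by omega
    rw [pvFree, dif_pos hk', dif_neg (by rw [hcn]; simp)]
    rw [ih (k - 1) (n + 1) (by omega) (by omega) (by omega)
      (fun m hm hmb => hfree m (by omega) hmb)]
    have e1 : min b (n + 1 + (k - 1)) = min b (n + k) := by omega
    have e2 : k - 1 - (min b (n + k) - (n + 1)) = k - (min b (n + k) - n) := by omega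
    rw [e1, e2, PySem.List.pyRange_one_cons ht]
    simp

theorem pv_goB_eq (used : List Int) (remaining n : Int) (bs : List Int)
    (hsorted : bs.Pairwise (· < ·))
    (hlow : ∀ b ∈ bs, n ≤ b)
    (hmem : ∀ m : Int, n ≤ m → (used.contains m = bs.contains m)) :
    pvGapFill bs remaining n = pvFree used remaining n := by
  induction bs generalizing remaining n with
  | nil =>
    simp only [pvGapFill]
    by_cases hr : 0 < remaining
    · rw [if_pos hr]
      rw [pv_free_gap used (n + remaining) (remaining.toNat) remaining n (by omega) (by omega)
        (by omega) (fun m hm _ => by rw [hmem m hm]; simp)]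
      have ht : min (n + remaining) (n + remaining) = n + remaining := by omega
      rw [ht, pv_free_nonpos used _ _ (by omega)]
      simp
    · rw [if_neg hr, pv_free_nonpos used _ _ (by omega)]
  | cons b bs ih =>
    simp only [pvGapFill]
    by_cases hr : remaining ≤ 0
    · rw [if_pos hr, pv_free_nonpos used _ _ hr]
    rw [if_neg hr]
    have hsorted' := (List.pairwise_cons.mp hsorted).2
    have hblow := (List.pairwise_cons.mp hsorted).1
    have hbn : n ≤ b := hlow b (List.mem_cons_self ..)
    have hmem' : ∀ m : Int, b + 1 ≤ m → used.contains m = bs.contains m := by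
      intro m hm
      rw [hmem m (by omega)]
      have hne : m ≠ b := by omega
      simp [List.contains_eq_mem, hne]
    have hcb : used.contains b = true := by
      rw [hmem b hbn]; simp
    have ihargs : ∀ r : Int, pvGapFill bs r (b + 1) = pvFree used r (b + 1) := by
      intro r
      refine ih r (b + 1) hsorted' ?_ hmem'
      intro b' hb'; have := hblow b' hb'; omega
    by_cases hnb : n < b
    · rw [if_pos hnb]
      -- the stretch [n, b) is free: the used values ≥ n all sit in b :: bs, all ≥ b
      have hfree : ∀ m : Int, n ≤ m → m < b → used.contains m = false := by
        intro m hm hmb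
        rw [hmem m hm]
        simp only [List.contains_eq_mem, decide_eq_false_iff_not, List.mem_cons]
        rintro (rfl | hmbs)
        · omega
        · have := hblow m hmbs; omega
      have hgap := pv_free_gap used b ((min (b - n) remaining).toNat) remaining n rfl
        (by omega) (by omega) hfree
      by_cases hcase : remaining ≤ b - n
      · -- the stretch alone satisfies the request
        rw [show min b (n + remaining) = n + remaining by omega] at hgap
        rw [show min (b - n) remaining = remaining by omega]
        rw [ihargs, hgap, pv_free_nonpos used _ _ (by omega),
          pv_free_nonpos used _ _ (by omega)]
      · -- the stretch ends at the blocker b; skip b and continue after it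
        rw [show min b (n + remaining) = b by omega] at hgap
        rw [show min (b - n) remaining = b - n by omega]
        have hskip : pvFree used (remaining - (b - n)) b
            = pvFree used (remaining - (b - n)) (b + 1) := by
          rw [pvFree, dif_pos (by omega), dif_pos hcb]
        rw [show n + (b - n) = b by omega, ihargs, hgap, hskip]
    · -- n = b: the candidate n itself is the blocker; skip it
      rw [if_neg hnb]
      have hnb' : n = b := by omega
      subst hnb'
      conv_rhs => rw [pvFree, dif_pos (by omega : (0:Int) < remaining), dif_pos hcb]
      exact ihargs remaining

theorem find_free_numbers_py_spec : Claim_equal_find_free_numbers_py := by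
  intro used count start_from _
  unfold Spec_find_free_numbers_py find_free_numbers_py find_free_numbers_py_alt
  rw [pv_goA_eq]
  simp only [List.length_nil, Int.natCast_zero, Int.sub_zero, List.nil_append]
  rw [pv_goB_eq used]
  · exact PySem.List.sorted_ofList_pairwise_lt _
  · intro b hb
    rw [PySem.List.mem_sorted, PySem.Set.mem_ofList] at hb
    have := (List.mem_filter.mp hb).2
    simp only [decide_eq_true_eq] at this
    omega
  · intro m hm
    simp only [List.contains_eq_mem, decide_eq_decide, PySem.List.mem_sorted,
      PySem.Set.mem_ofList, List.mem_filter, decide_eq_true_eq]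
    exact ⟨fun h => ⟨h, hm⟩, fun h => h.1⟩
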